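-- pv_equiv track=rewrite | github.com/rizveeredwan/copy-checker | system_functions/copy_checker/match_source_with_norm.py | only_word_parse
-- ===== SOURCE A (Python) =====
-- ignore_characters = ['\n', ' ', '\t', '\b', '{', '}']
--
-- def only_word_parse(text=""):
--     _list = []
--     ongoing = ""
--     for i in range(0, len(text)):
--         if text[i] in ignore_characters:
--             if ongoing != "":
--                 _list.append(ongoing)
--                 ongoing = ""
--             _list.append(text[i])
--         else:
--             ongoing = ongoing + text[i]
--     if ongoing != "":
--         _list.append(ongoing)
--     return _list
-- ===== SOURCE B (Python) =====
-- ignore_characters = ['\n', ' ', '\t', '\b', '{', '}']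
--
-- def only_word_parse(text=""):
--     seps = set(ignore_characters)
--     tokens = []
--     i, n = 0, len(text)
--     while i < n:
--         if text[i] in seps:
--             tokens.append(text[i])
--             i += 1
--         else:
--             j = i + 1
--             while j < n and text[j] not in seps:
--                 j += 1
--             tokens.append(text[i:j])
--             i = j
--     return tokens
-- ===== Notes on version B (the rewrite author's own statement) =====
-- stated objective: faster
-- what changed: Replaces the per-character string-buffer accumulation with a two-pointer scan that slices each maximal non-separator run out as one token.
import Mathlib
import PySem

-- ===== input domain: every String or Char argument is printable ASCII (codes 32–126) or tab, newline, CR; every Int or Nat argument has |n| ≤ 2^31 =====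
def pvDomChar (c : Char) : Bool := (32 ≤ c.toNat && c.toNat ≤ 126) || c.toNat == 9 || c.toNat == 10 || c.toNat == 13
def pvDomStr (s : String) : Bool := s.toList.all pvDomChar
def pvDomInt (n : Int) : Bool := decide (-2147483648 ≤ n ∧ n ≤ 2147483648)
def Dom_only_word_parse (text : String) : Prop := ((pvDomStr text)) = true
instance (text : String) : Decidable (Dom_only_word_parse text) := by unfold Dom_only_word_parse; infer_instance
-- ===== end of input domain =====

-- B replaces A's per-character "ongoing" buffer with a maximal-run (takeWhile/dropWhile) scan; same output, alternative structure.


-- ignore_characters = ['\n', ' ', '\t', '\b', '{', '}']  ('\b' is backspace, \x08)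
def pvIsSep (c : Char) : Bool := c = '\n' || c = ' ' || c = '\t' || c = Char.ofNat 8 || c = '{' || c = '}'

-- ===== PORT A =====
-- A's loop: state (_list, ongoing); ongoing kept as List Char (Python string concatenation char by char).
def pvStepA (st : List String × List Char) (c : Char) : List String × List Char :=
  if pvIsSep c then
    ((if st.2 ≠ [] then st.1 ++ [String.mk st.2] else st.1) ++ [String.mk [c]], [])
  else
    (st.1, st.2 ++ [c])

def only_word_parse (text : String) : List String :=
  let st := text.toList.foldl pvStepA ([], [])
  if st.2 ≠ [] then st.1 ++ [String.mk st.2] else st.1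

-- ===== PORT B =====
-- B's outer while loop: each step emits either one separator char or one maximal non-separator run.
def pvTokB : List Char → List String
  | [] => []
  | c :: rest =>
    if pvIsSep c then String.mk [c] :: pvTokB rest
    else String.mk (c :: rest.takeWhile (fun d => !pvIsSep d)) :: pvTokB (rest.dropWhile (fun d => !pvIsSep d))
termination_by cs => cs.length
decreasing_by
  · simp
  · have := List.length_dropWhile_le (p := fun d => !pvIsSep d) (l := rest)
    simp; omega

def only_word_parse_alt (text : String) : List String := pvTokB text.toList

-- ===== PRECONDITION & SPEC =====
def Spec_only_word_parse (text : String) (out : List String) : Prop := out = only_word_parse_alt text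
instance (text : String) (out : List String) : Decidable (Spec_only_word_parse text out) := by unfold Spec_only_word_parse; infer_instance

-- ===== CLAIM (what is proved, stated in full; the proofs are below) =====
def Claim_equal_only_word_parse : Prop := ∀ (text : String), Dom_only_word_parse text → Spec_only_word_parse text (only_word_parse text)

-- ===== LEMMAS AND PROOFS =====

-- A's tokenization with a pending buffer o, as a recursive characterization of the fold.
def pvTokP (o : List Char) : List Char → List String
  | [] => if o = [] then [] else [String.mk o]
  | c :: rest =>
    if pvIsSep c then (if o = [] then [] else [String.mk o]) ++ String.mk [c] :: pvTokP [] rest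
    else pvTokP (o ++ [c]) rest

theorem pvFoldA_eq_tokP (cs : List Char) : ∀ (acc : List String) (o : List Char),
    (let st := cs.foldl pvStepA (acc, o)
     if st.2 ≠ [] then st.1 ++ [String.mk st.2] else st.1) = acc ++ pvTokP o cs := by
  induction cs with
  | nil =>
    intro acc o
    simp only [List.foldl_nil, pvTokP]
    by_cases h : o = [] <;> simp [h]
  | cons c rest ih =>
    intro acc o
    simp only [List.foldl_cons, pvTokP, pvStepA]
    by_cases hs : pvIsSep c
    · by_cases ho : o = [] <;> simp [hs, ho, ih, List.append_assoc]
    · simp [hs, ih]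

theorem pvTokP_eq_tokB (cs : List Char) : ∀ (o : List Char),
    pvTokP o cs = if o = [] then pvTokB cs
      else String.mk (o ++ cs.takeWhile (fun d => !pvIsSep d)) :: pvTokB (cs.dropWhile (fun d => !pvIsSep d)) := by
  induction cs with
  | nil =>
    intro o
    by_cases ho : o = [] <;> simp [pvTokP, pvTokB, ho]
  | cons c rest ih =>
    intro o
    by_cases hs : pvIsSep c
    · by_cases ho : o = [] <;>
        simp [pvTokP, pvTokB, hs, ho, List.takeWhile_cons, List.dropWhile_cons, ih]
    · have hrec : pvTokB (c :: rest) =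
          String.mk (c :: rest.takeWhile (fun d => !pvIsSep d)) ::
            pvTokB (rest.dropWhile (fun d => !pvIsSep d)) := by
        rw [pvTokB]; simp [hs]
      by_cases ho : o = [] <;>
        simp [pvTokP, hs, ho, ih, hrec, List.takeWhile_cons, List.dropWhile_cons]

-- ===== VERDICT (by name: the statement is the Claim_ definition above) =====
theorem only_word_parse_spec : Claim_equal_only_word_parse := by
  intro text _
  unfold Spec_only_word_parse only_word_parse only_word_parse_alt
  rw [pvFoldA_eq_tokP text.toList [] [], pvTokP_eq_tokB]
  simp
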